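-- pv_equiv track=rewrite | github.com/bracken1022/test_unittest | src/rome.py | __matchRepeatedRules
-- ===== SOURCE A (Python) =====
-- def __matchRepeatedRules(romeList):
--     romeSuccession = []
--     lastPos = 0
--     firstPos = 0
--     for i in range(1, len(romeList)):
--         if romeList[i] == romeList[i-1]:
--             lastPos = i
--         else:
--             romeSuccession.append(romeList[firstPos:lastPos + 1])
--             firstPos = lastPos + 1
--             lastPos = i
--
--     romeSuccession.append(romeList[firstPos:lastPos + 1])
--
--     for succession in romeSuccession:
--         if len(succession) == 3:
--             element = succession[0]
--             if element not in ["I", "X", "C", "M"]: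
--                 return False
--
--         if len(succession) > 3:
--             return False
--
--     return True
-- ===== SOURCE B (Python) =====
-- def __matchRepeatedRules(romeList):
--     # Single pass with a run counter; no intermediate list of run-sublists is built.
--     if not romeList:
--         return True
--     cur = romeList[0]
--     cnt = 1
--     for x in romeList[1:]:
--         if x == cur:
--             cnt += 1
--         else:
--             if cnt > 3 or (cnt == 3 and cur not in ("I", "X", "C", "M")):
--                 return False
--             cur = x
--             cnt = 1
--     return cnt < 3 or (cnt == 3 and cur in ("I", "X", "C", "M"))
-- ===== Notes on version B (the rewrite author's own statement) =====
-- stated objective: simpler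
-- what changed: Replaces the build-then-scan (index loop slicing the list into run-sublists, then a second loop validating each sublist) with a single pass that tracks only the current element and its run count, validating each run as it ends.
import Mathlib
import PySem

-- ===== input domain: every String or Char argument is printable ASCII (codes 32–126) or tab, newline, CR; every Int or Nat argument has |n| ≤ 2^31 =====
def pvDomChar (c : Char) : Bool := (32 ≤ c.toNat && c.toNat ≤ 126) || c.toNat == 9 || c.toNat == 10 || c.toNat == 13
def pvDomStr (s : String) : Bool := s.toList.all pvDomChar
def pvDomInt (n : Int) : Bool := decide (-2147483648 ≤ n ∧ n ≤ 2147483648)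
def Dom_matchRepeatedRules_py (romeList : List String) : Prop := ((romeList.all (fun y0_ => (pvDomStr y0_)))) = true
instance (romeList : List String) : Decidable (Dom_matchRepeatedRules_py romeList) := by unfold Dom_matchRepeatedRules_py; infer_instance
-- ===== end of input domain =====

-- B replaces A's build-then-scan (slice the list into run-sublists, then validate each)
-- with one pass keeping only the current element and its run count (objective: simpler).

-- ===== PORT A =====
-- second loop of A: early-return scan over the run-sublists
-- (succession[0] is only read when len == 3 > 0, so the .getD "" default is never used)
def checkSucc : List (List String) → Bool
  | [] => true
  | g :: gs =>
    if g.length == 3 && !(["I", "X", "C", "M"].contains ((PySem.List.pyGet? g 0).getD "")) then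
      false
    else if 3 < g.length then
      false
    else checkSucc gs

-- body of A's first loop; state = (romeSuccession, lastPos, firstPos)
def aStep (romeList : List String) (st : List (List String) × Int × Int) (i : Int) :
    List (List String) × Int × Int :=
  if PySem.List.pyGet? romeList i == PySem.List.pyGet? romeList (i - 1) then
    (st.1, i, st.2.2)
  else
    (st.1 ++ [PySem.List.slice romeList (some st.2.2) (some (st.2.1 + 1))], i, st.2.1 + 1)

def matchRepeatedRules_py (romeList : List String) : Bool :=
  let st := (PySem.List.pyRange 1 (romeList.length : Int) 1).foldl (aStep romeList) ([], 0, 0)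
  checkSucc (st.1 ++ [PySem.List.slice romeList (some st.2.2) (some (st.2.1 + 1))])

-- ===== PORT B =====
def altAllowed (c : String) : Bool := ["I", "X", "C", "M"].contains c

-- B's loop over romeList[1:]; cur/cnt are the current run's element and length
def altGo : List String → String → Int → Bool
  | [], cur, cnt => decide (cnt < 3) || (cnt == 3 && altAllowed cur)
  | x :: xs, cur, cnt =>
    if x == cur then altGo xs cur (cnt + 1)
    else if 3 < cnt || (cnt == 3 && !altAllowed cur) then false
    else altGo xs x 1

def matchRepeatedRules_py_alt : List String → Bool
  | [] => true
  | x :: xs => altGo xs x 1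

-- ===== PRECONDITION & SPEC =====
def Spec_matchRepeatedRules_py (romeList : List String) (out : Bool) : Prop := out = matchRepeatedRules_py_alt romeList
instance (romeList : List String) (out : Bool) : Decidable (Spec_matchRepeatedRules_py romeList out) := by unfold Spec_matchRepeatedRules_py; infer_instance

-- ===== CLAIM (what is proved, stated in full; the proofs are below) =====
def Claim_equal_matchRepeatedRules_py : Prop := ∀ (romeList : List String), Dom_matchRepeatedRules_py romeList → Spec_matchRepeatedRules_py romeList (matchRepeatedRules_py romeList)

-- ===== LEMMAS AND PROOFS =====

-- run-length grouping: the list of maximal runs of equal adjacent elements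
def runs : List String → List (List String)
  | [] => []
  | x :: xs =>
    match runs xs with
    | [] => [[x]]
    | (y :: g) :: gs => if x == y then (x :: y :: g) :: gs else [x] :: (y :: g) :: gs
    | [] :: gs => [x] :: [] :: gs

def lastRun (t : List String) : List String := ((runs t).getLast?).getD []

def okRun (g : List String) : Bool :=
  !(g.length == 3 && !(["I", "X", "C", "M"].contains ((PySem.List.pyGet? g 0).getD ""))) &&
    !(3 < g.length : Bool)

theorem runs_singleton (x : String) : runs [x] = [[x]] := rfl

theorem runs_cons_eq (x : String) (xs : List String) (y : String) (g : List String)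
    (gs : List (List String)) (hsh : runs xs = (y :: g) :: gs) :
    runs (x :: xs) = if x == y then (x :: y :: g) :: gs else [x] :: (y :: g) :: gs := by
  have h : runs (x :: xs) =
      (match runs xs with
        | [] => [[x]]
        | (y :: g) :: gs => if x == y then (x :: y :: g) :: gs else [x] :: (y :: g) :: gs
        | [] :: gs => [x] :: [] :: gs) := rfl
  rw [h, hsh]

theorem checkSucc_eq_all (gs : List (List String)) : checkSucc gs = gs.all okRun := by
  induction gs with
  | nil => rfl
  | cons g gs ih =>
    rw [checkSucc, List.all_cons, ← ih, okRun]
    cases h1 : (g.length == 3 && !(["I", "X", "C", "M"].contains ((PySem.List.pyGet? g 0).getD ""))) <;>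
      by_cases h2 : 3 < g.length <;> simp [h1, h2]

theorem runs_cons_shape (x : String) (xs : List String) :
    ∃ g gs, runs (x :: xs) = (x :: g) :: gs := by
  rcases h : runs xs with _ | ⟨g0, gs⟩
  · exact ⟨[], [], by
      have : runs (x :: xs) =
          (match runs xs with
            | [] => [[x]]
            | (y :: g) :: gs => if x == y then (x :: y :: g) :: gs else [x] :: (y :: g) :: gs
            | [] :: gs => [x] :: [] :: gs) := rfl
      rw [this, h]⟩
  · rcases g0 with _ | ⟨y, g⟩
    · exact ⟨[], [] :: gs, by
        have : runs (x :: xs) =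
            (match runs xs with
              | [] => [[x]]
              | (y :: g) :: gs => if x == y then (x :: y :: g) :: gs else [x] :: (y :: g) :: gs
              | [] :: gs => [x] :: [] :: gs) := rfl
        rw [this, h]⟩
    · by_cases hx : x == y
      · exact ⟨y :: g, gs, by rw [runs_cons_eq x xs y g gs h, if_pos hx]⟩
      · exact ⟨[], (y :: g) :: gs, by rw [runs_cons_eq x xs y g gs h, if_neg (by simpa using hx)]⟩

theorem runs_ne_nil (x : String) (xs : List String) : runs (x :: xs) ≠ [] := by
  obtain ⟨g, gs, h⟩ := runs_cons_shape x xs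
  simp [h]

theorem runs_flatten : ∀ t : List String, (runs t).flatten = t := by
  intro t
  induction t with
  | nil => rfl
  | cons x xs ih =>
    rcases hsh : runs xs with _ | ⟨g0, gs⟩
    · have hxs : xs = [] := by rw [← ih, hsh]; rfl
      subst hxs
      simp [runs_singleton]
    · rcases g0 with _ | ⟨y, g⟩
      · have : runs (x :: xs) =
            (match runs xs with
              | [] => [[x]]
              | (y :: g) :: gs => if x == y then (x :: y :: g) :: gs else [x] :: (y :: g) :: gs
              | [] :: gs => [x] :: [] :: gs) := rfl
        rw [this, hsh]
        rw [hsh] at ih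
        simpa using ih
      · rw [runs_cons_eq x xs y g gs hsh]
        rw [hsh] at ih
        by_cases hx : x == y <;> simp [hx, ← ih]

-- runs t = (runs t).dropLast ++ [lastRun t]  for t ≠ []
theorem runs_eq_dropLast_append (t : List String) (ht : t ≠ []) :
    runs t = (runs t).dropLast ++ [lastRun t] := by
  rcases t with _ | ⟨x, xs⟩
  · exact absurd rfl ht
  · have hne := runs_ne_nil x xs
    have h := List.dropLast_append_getLast hne
    rw [lastRun, List.getLast?_eq_getLast hne]
    simpa using h.symm

theorem runs_decomp (t : List String) (ht : t ≠ []) :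
    ∃ A, runs t = A ++ [lastRun t] :=
  ⟨(runs t).dropLast, runs_eq_dropLast_append t ht⟩

theorem flatten_decomp (t : List String) (ht : t ≠ []) :
    ∃ A, runs t = A ++ [lastRun t] ∧ A.flatten ++ lastRun t = t := by
  obtain ⟨A, hA⟩ := runs_decomp t ht
  refine ⟨A, hA, ?_⟩
  have hf := runs_flatten t
  rw [hA] at hf
  simpa using hf

theorem lastRun_length_le (t : List String) (ht : t ≠ []) : (lastRun t).length ≤ t.length := by
  obtain ⟨A, _, hf⟩ := flatten_decomp t ht
  have := congrArg List.length hf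
  simp only [List.length_append] at this
  omega

-- the last run is the suffix of t of its own length
theorem drop_eq_lastRun (t : List String) (ht : t ≠ []) :
    t.drop (t.length - (lastRun t).length) = lastRun t := by
  obtain ⟨A, _, hf⟩ := flatten_decomp t ht
  have hlen : A.flatten.length + (lastRun t).length = t.length := by
    have := congrArg List.length hf
    simpa using this
  have h2 : t.length - (lastRun t).length = A.flatten.length := by omega
  rw [h2]
  conv_lhs => rw [← hf]
  simp

theorem runs_snoc_ne : ∀ (t : List String) (x : String), t.getLast? ≠ some x →
    runs (t ++ [x]) = runs t ++ [[x]] := by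
  intro t
  induction t with
  | nil => intro x _; rfl
  | cons a t' ih =>
    intro x hx
    rcases t' with _ | ⟨b, t''⟩
    · have hax : ¬(a == x) := by simpa using hx
      show runs (a :: [x]) = [[a]] ++ [[x]]
      rw [runs_cons_eq a [x] x [] [] (runs_singleton x), if_neg hax]
      rfl
    · have hlast : (b :: t'').getLast? ≠ some x := by
        rwa [List.getLast?_cons_cons] at hx
      have ih' := ih x hlast
      obtain ⟨g, gs, hsh⟩ := runs_cons_shape b t''
      have hsh' : runs ((b :: t'') ++ [x]) = (b :: g) :: (gs ++ [[x]]) := by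
        rw [ih', hsh]; rfl
      show runs (a :: ((b :: t'') ++ [x])) = runs (a :: b :: t'') ++ [[x]]
      rw [runs_cons_eq a _ b g (gs ++ [[x]]) hsh', runs_cons_eq a _ b g gs hsh]
      by_cases hab : a == b <;> simp [hab]

theorem runs_snoc_eq : ∀ (t : List String) (x : String), t.getLast? = some x →
    runs (t ++ [x]) = (runs t).dropLast ++ [lastRun t ++ [x]] := by
  intro t
  induction t with
  | nil => intro x hx; simp at hx
  | cons a t' ih =>
    intro x hx
    rcases t' with _ | ⟨b, t''⟩
    · have hax : a = x := by simpa using hx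
      subst hax
      show runs (a :: [a]) = _
      rw [runs_cons_eq a [a] a [] [] (runs_singleton a), if_pos (by simp)]
      simp [lastRun, runs_singleton]
    · have hlast : (b :: t'').getLast? = some x := by
        rwa [List.getLast?_cons_cons] at hx
      have ih' := ih x hlast
      obtain ⟨g, gs, hsh⟩ := runs_cons_shape b t''
      show runs (a :: ((b :: t'') ++ [x])) = _
      rcases gs with _ | ⟨h0, gs'⟩
      · -- t' is a single run
        have hlr : lastRun (b :: t'') = b :: g := by simp [lastRun, hsh]
        have hsh' : runs ((b :: t'') ++ [x]) = (b :: (g ++ [x])) :: [] := by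
          rw [ih', hsh, hlr]; simp
        rw [runs_cons_eq a _ b (g ++ [x]) [] hsh', runs_cons_eq a _ b g [] hsh]
        by_cases hab : a == b <;>
          simp [hab, lastRun, runs_cons_eq a (b :: t'') b g [] hsh]
      · -- at least two runs in t'
        have hsh' : runs ((b :: t'') ++ [x]) =
            (b :: g) :: ((h0 :: gs').dropLast ++ [lastRun (b :: t'') ++ [x]]) := by
          rw [ih', hsh]
          rfl
        have hlr2 : lastRun (a :: b :: t'') = lastRun (b :: t'') := by
          rw [lastRun, lastRun, runs_cons_eq a (b :: t'') b g (h0 :: gs') hsh, hsh]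
          by_cases hab : a == b <;> simp [hab]
        rw [runs_cons_eq a _ b g _ hsh', runs_cons_eq a _ b g (h0 :: gs') hsh, hlr2]
        by_cases hab : a == b <;> simp [hab]

theorem runs_replicate (c : String) : ∀ m : Nat,
    runs (List.replicate (m + 1) c) = [List.replicate (m + 1) c] := by
  intro m
  induction m with
  | zero => simp [runs_singleton]
  | succ m ih =>
    have hsh : runs (List.replicate (m + 1) c) = (c :: List.replicate m c) :: [] := by
      rw [ih]; simp [List.replicate_succ]
    have h1 : List.replicate (m + 2) c = c :: List.replicate (m + 1) c := by
      simp [List.replicate_succ]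
    rw [h1, runs_cons_eq c _ c (List.replicate m c) [] hsh]
    simp [List.replicate_succ]

theorem runs_replicate_cons_ne (c y : String) (ys : List String) (hcy : c ≠ y) : ∀ m : Nat,
    runs (List.replicate (m + 1) c ++ y :: ys) = List.replicate (m + 1) c :: runs (y :: ys) := by
  intro m
  induction m with
  | zero =>
    obtain ⟨g, gs, hsh⟩ := runs_cons_shape y ys
    show runs (c :: y :: ys) = [c] :: runs (y :: ys)
    rw [runs_cons_eq c _ y g gs hsh, if_neg (by simpa using hcy), hsh]
  | succ m ih =>
    have h1 : List.replicate (m + 2) c ++ y :: ys = c :: (List.replicate (m + 1) c ++ y :: ys) := by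
      simp [List.replicate_succ]
    have hsh : runs (List.replicate (m + 1) c ++ y :: ys)
        = (c :: List.replicate m c) :: runs (y :: ys) := by
      rw [ih]; simp [List.replicate_succ]
    rw [h1, runs_cons_eq c _ c (List.replicate m c) (runs (y :: ys)) hsh]
    simp [List.replicate_succ]

theorem okRun_replicate (c : String) (m : Nat) :
    okRun (List.replicate (m + 1) c) =
      !((decide (3 < ((m : Int) + 1))) || ((((m : Int) + 1) == 3) && !altAllowed c)) := by
  have hget : PySem.List.pyGet? (List.replicate (m + 1) c) 0 = some c := by
    rw [List.replicate_succ]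
    exact PySem.List.pyGet?_zero_cons c (List.replicate m c)
  rw [okRun, hget]
  simp only [Option.getD_some, List.length_replicate]
  rw [show ((["I", "X", "C", "M"] : List String).contains c) = altAllowed c from rfl]
  generalize altAllowed c = B
  rw [Bool.eq_iff_iff]
  by_cases hc : B = true <;> simp [hc, beq_iff_eq] <;> omega

theorem altGo_eq : ∀ (xs : List String) (c : String) (m : Nat),
    altGo xs c ((m : Int) + 1) = (runs (List.replicate (m + 1) c ++ xs)).all okRun := by
  intro xs
  induction xs with
  | nil =>
    intro c m
    rw [altGo, List.append_nil, runs_replicate, List.all_cons, List.all_nil, Bool.and_true,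
      okRun_replicate]
    generalize altAllowed c = B
    rw [Bool.eq_iff_iff]
    by_cases hc : B = true <;> simp [hc, beq_iff_eq] <;> omega
  | cons x xs ih =>
    intro c m
    rw [altGo]
    by_cases hxc : (x == c) = true
    · have hx : x = c := by simpa using hxc
      subst hx
      rw [if_pos hxc]
      have hcast : ((m : Int) + 1) + 1 = ((m + 1 : Nat) : Int) + 1 := by push_cast; ring
      rw [hcast, ih]
      have hlist : List.replicate (m + 1 + 1) x ++ xs = List.replicate (m + 1) x ++ x :: xs := by
        rw [List.replicate_succ']
        simp
      rw [hlist]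
    · rw [if_neg hxc]
      have hone : altGo xs x 1 = (runs (List.replicate 1 x ++ xs)).all okRun := by
        have := ih x 0
        simpa using this
      have hcx : c ≠ x := fun h => hxc (by simp [h])
      rw [runs_replicate_cons_ne c x xs hcx m, List.all_cons, okRun_replicate]
      cases hb : (decide (3 < (m : Int) + 1) || (((m : Int) + 1) == 3 && !altAllowed c)) <;>
        simp [hb, hone]

theorem B_char (l : List String) : matchRepeatedRules_py_alt l = (runs l).all okRun := by
  rcases l with _ | ⟨x, xs⟩
  · rfl
  · show altGo xs x 1 = _
    have h := altGo_eq xs x 0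
    simpa using h

-- the slice A takes at the end of a run is exactly that run
theorem slice_lastRun (l : List String) (k : Nat) (hk1 : 1 ≤ k) (hk : k ≤ l.length)
    (htake_ne : l.take k ≠ []) :
    PySem.List.slice l (some ((k : Int) - ((lastRun (l.take k)).length : Int)))
      (some (((k : Int) - 1) + 1)) = lastRun (l.take k) := by
  have hlen_take : (l.take k).length = k := by simp; omega
  obtain ⟨L, hL⟩ : ∃ L, L = lastRun (l.take k) := ⟨_, rfl⟩
  rw [← hL]
  have hlenle : L.length ≤ k := by
    rw [hL]
    have := lastRun_length_le (l.take k) htake_ne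
    rwa [hlen_take] at this
  have h4 : (l.take k).drop (k - L.length) = L := by
    rw [hL]
    have := drop_eq_lastRun (l.take k) htake_ne
    rwa [hlen_take] at this
  have h1 : (k : Int) - (L.length : Int) = ((k - L.length : Nat) : Int) := by omega
  have h2 : ((k : Int) - 1) + 1 = ((k : Nat) : Int) := by ring
  have h5 : (l.take k).drop (k - L.length) = (l.drop (k - L.length)).take L.length := by
    rw [List.drop_take, show k - (k - L.length) = L.length from by omega]
  rw [h1, h2, PySem.List.slice_natCast,
    show k - (k - L.length) = L.length from by omega, ← h5, h4]

theorem loopA (l : List String) (hl : l ≠ []) : ∀ k : Nat, 1 ≤ k → k ≤ l.length →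
    (PySem.List.pyRange 1 (k : Int) 1).foldl (aStep l) ([], 0, 0)
      = ((runs (l.take k)).dropLast,
          ((k : Int) - 1, (k : Int) - ((lastRun (l.take k)).length : Int))) := by
  intro k
  induction k with
  | zero => intro h1 _; omega
  | succ k ih =>
    intro _ hk2
    rcases Nat.eq_zero_or_pos k with hk0 | hk1
    · subst hk0
      rcases l with _ | ⟨x, ls⟩
      · exact absurd rfl hl
      · rw [show (((0:Nat) + 1 : Nat) : Int) = 1 by norm_num,
          PySem.List.pyRange_one_eq_nil (by norm_num)]
        simp [List.take_succ, runs_singleton, lastRun]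
    · have hk : k < l.length := by omega
      have hcast : ((k + 1 : Nat) : Int) = (k : Int) + 1 := by push_cast; ring
      have hpr : PySem.List.pyRange 1 ((k : Int) + 1) 1
          = PySem.List.pyRange 1 (k : Int) 1 ++ [(k : Int)] :=
        PySem.List.pyRange_one_succ_right (by exact_mod_cast hk1)
      rw [hcast, hpr, List.foldl_append, ih (by omega) (by omega)]
      have hgetk : PySem.List.pyGet? l (k : Int) = some l[k] := by
        simp [List.getElem?_eq_getElem hk]
      have hgetk1 : PySem.List.pyGet? l ((k : Int) - 1) = some l[k - 1] := by
        have h : (k : Int) - 1 = ((k - 1 : Nat) : Int) := by omega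
        rw [h]
        simp [List.getElem?_eq_getElem (show k - 1 < l.length by omega)]
      have hlen_take : (l.take k).length = k := by simp; omega
      have htake_ne : l.take k ≠ [] := by
        intro h
        have := congrArg List.length h
        rw [hlen_take] at this
        simp at this
        omega
      have hlast_take : (l.take k).getLast? = some l[k - 1] := by
        rw [List.getLast?_eq_getElem?, hlen_take]
        rw [List.getElem?_take_of_lt (by omega)]
        exact List.getElem?_eq_getElem (by omega)
      have htake_succ : l.take (k + 1) = l.take k ++ [l[k]] := by
        rw [List.take_succ, List.getElem?_eq_getElem hk]
        rfl
      simp only [List.foldl_cons, List.foldl_nil, aStep, hgetk, hgetk1]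
      by_cases heq : l[k] = l[k - 1]
      · rw [if_pos (by simp [heq])]
        have hsnoc' : runs (l.take (k + 1))
            = (runs (l.take k)).dropLast ++ [lastRun (l.take k) ++ [l[k]]] := by
          rw [htake_succ]
          exact runs_snoc_eq _ _ (by rw [hlast_take, heq])
        have e2 : lastRun (l.take (k + 1)) = lastRun (l.take k) ++ [l[k]] := by
          rw [lastRun, hsnoc', List.getLast?_concat]
          rfl
        simp only [Prod.mk.injEq]
        refine ⟨?_, ?_, ?_⟩
        · rw [hsnoc', List.dropLast_concat]
        · push_cast; ring
        · rw [e2, List.length_append, List.length_singleton]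
          push_cast
          ring
      · rw [if_neg (by simp [heq])]
        have hsnoc' : runs (l.take (k + 1)) = runs (l.take k) ++ [[l[k]]] := by
          rw [htake_succ]
          refine runs_snoc_ne _ _ ?_
          rw [hlast_take]
          intro hcon
          exact heq (Option.some.inj hcon).symm
        have e2 : lastRun (l.take (k + 1)) = [l[k]] := by
          rw [lastRun, hsnoc', List.getLast?_concat]
          rfl
        have erus : (runs (l.take k)).dropLast ++ [lastRun (l.take k)] = runs (l.take k) :=
          (runs_eq_dropLast_append _ htake_ne).symm
        simp only [Prod.mk.injEq]
        refine ⟨?_, ?_, ?_⟩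
        · rw [slice_lastRun l k (by omega) (by omega) htake_ne, erus, hsnoc',
            List.dropLast_concat]
        · push_cast; ring
        · rw [e2, List.length_singleton]
          push_cast
          ring

theorem A_char (l : List String) (hl : l ≠ []) :
    matchRepeatedRules_py l = checkSucc (runs l) := by
  have hn1 : 1 ≤ l.length := List.length_pos_of_ne_nil hl
  have hdef : matchRepeatedRules_py l = checkSucc
      (((PySem.List.pyRange 1 (l.length : Int) 1).foldl (aStep l) ([], 0, 0)).1
        ++ [PySem.List.slice l
            (some ((PySem.List.pyRange 1 (l.length : Int) 1).foldl (aStep l) ([], 0, 0)).2.2)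
            (some (((PySem.List.pyRange 1 (l.length : Int) 1).foldl (aStep l) ([], 0, 0)).2.1 + 1))]) := rfl
  rw [hdef, loopA l hl l.length hn1 le_rfl]
  have htake_ne : l.take l.length ≠ [] := by rwa [List.take_length]
  simp only
  rw [slice_lastRun l l.length hn1 le_rfl htake_ne, List.take_length,
    ← runs_eq_dropLast_append l hl]

theorem main_eq (l : List String) : matchRepeatedRules_py l = matchRepeatedRules_py_alt l := by
  rcases l with _ | ⟨x, xs⟩
  · decide
  · rw [A_char _ (by simp), checkSucc_eq_all, ← B_char]

-- ===== VERDICT (by name: the statement is the Claim_ definition above) =====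
theorem matchRepeatedRules_py_spec : Claim_equal_matchRepeatedRules_py := by
  intro romeList _
  unfold Spec_matchRepeatedRules_py
  exact main_eq romeList
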